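-- pv_equiv track=rewrite | github.com/johnbaek12025/hb | ET_HYB05/josa.py | numberToKoreanZoo
-- ===== SOURCE A (Python) =====
-- def numberToKoreanZoo(num):
-- 	if num < 0:
-- 		temp_append_str = '-'
-- 	else:
-- 		temp_append_str = ''
--
-- 	num = str(abs(num))
-- 	unit_word = ['주', '만', '억', '조', '경', '해']
-- 	num_list = []
-- 	iteration = len(num) / 4
-- 	if num == '0':
-- 		return '0주'
--
-- 	while(iteration > 1):
-- 		num_list.append(num[-4:])
-- 		num = num[:-4]
-- 		iteration = len(num) / 4
-- 	num_list.append(num)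
-- 	ko_won = ""
--
-- 	for i in reversed(range(len(num_list))):
-- 		temp_str = num_list[i]
-- 		while(temp_str[0] == "0"):
-- 			temp_str = temp_str[1:]
-- 			if len(temp_str) == 0:
-- 				break
--
-- 		if not len(temp_str) == 0:
-- 			ko_won = ko_won + " " + temp_str +  unit_word[i]
-- 	if ko_won[-1] == '주':
-- 		pass
-- 	else:
-- 		ko_won = ko_won + " 주"
--
-- 	return temp_append_str + ko_won[1:]
-- ===== SOURCE B (Python) =====
-- def numberToKoreanZoo(num):
-- 	unit_word = ['주', '만', '억', '조', '경', '해']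
-- 	sign = '-' if num < 0 else ''
-- 	n = abs(num)
-- 	if n == 0:
-- 		return '0주'
-- 	groups = []
-- 	while n > 0:
-- 		n, r = divmod(n, 10000)
-- 		groups.append(r)
-- 	parts = [str(groups[i]) + unit_word[i]
-- 	         for i in reversed(range(len(groups))) if groups[i] != 0]
-- 	body = ' '.join(parts)
-- 	if groups[0] == 0:
-- 		body += ' 주'
-- 	return sign + body
-- ===== Notes on version B (the rewrite author's own statement) =====
-- stated objective: idiomatic
-- what changed: B computes the 4-digit groups arithmetically with divmod(n, 10000) and str() instead of A's string slicing and manual leading-zero stripping, and assembles the result with a comprehension plus ' '.join instead of A's accumulator string with a leading-space trim.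
import Mathlib
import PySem

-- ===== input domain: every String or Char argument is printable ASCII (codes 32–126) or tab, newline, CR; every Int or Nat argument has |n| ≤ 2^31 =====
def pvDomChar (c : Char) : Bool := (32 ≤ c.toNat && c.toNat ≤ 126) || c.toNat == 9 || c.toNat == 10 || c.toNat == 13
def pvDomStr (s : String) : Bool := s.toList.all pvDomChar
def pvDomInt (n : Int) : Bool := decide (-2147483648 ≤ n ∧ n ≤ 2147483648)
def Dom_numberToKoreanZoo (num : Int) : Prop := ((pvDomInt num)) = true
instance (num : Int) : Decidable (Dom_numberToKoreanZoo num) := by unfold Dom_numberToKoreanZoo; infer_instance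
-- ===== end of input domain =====

-- B replaces A's string-slicing/zero-stripping group extraction by arithmetic divmod groups
-- assembled with ' '.join (idiomatic; same asymptotic cost).


-- ===== PORT A =====
-- while temp_str[0] == "0": temp_str = temp_str[1:]; if len(temp_str)==0: break
def pvStripA : List Char → List Char
  | [] => []   -- unreachable in A: the loop is only entered on nonempty group strings
  | c :: rest =>
    if c = '0' then (if rest.length = 0 then [] else pvStripA rest) else c :: rest

-- while iteration > 1: num_list.append(num[-4:]); num = num[:-4]
-- (iteration = len(num)/4 in true division, so 'iteration > 1' is exactly 'len(num) > 4')
def pvGroupLoopA (s : List Char) (acc : List (List Char)) : List (List Char) :=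
  if 4 < s.length then
    pvGroupLoopA (PySem.List.slice s none (some (-4)))
      (acc ++ [PySem.List.slice s (some (-4)) none])
  else acc ++ [s]
termination_by s.length
decreasing_by
  rw [PySem.List.slice_to_neg_ofNat s 4 (by omega)]
  simp only [List.length_take]
  omega

-- for i in reversed(range(len(num_list))): strip zeros; append " "+temp_str+unit_word[i]
def pvKoLoopA (numList unitWord : List (List Char)) : List Char :=
  ((List.range numList.length).reverse).foldl
    (fun (koWon : List Char) (i : Nat) =>
      let tempStr := pvStripA (PySem.List.pyGetD numList (i : Int) [])
      if ¬ tempStr.length = 0 then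
        koWon ++ [' '] ++ tempStr ++ PySem.List.pyGetD unitWord (i : Int) []
      else koWon) []

def numberToKoreanZoo (num : Int) : String :=
  let tempAppendStr : List Char := if num < 0 then ['-'] else []
  let numS : List Char := PySem.Int.toChars (num.natAbs : Int)   -- str(abs(num))
  let unitWord : List (List Char) := [['주'], ['만'], ['억'], ['조'], ['경'], ['해']]
  if numS = ['0'] then "0주"
  else
    let numList := pvGroupLoopA numS []
    let koWon := pvKoLoopA numList unitWord
    let koWon2 := if PySem.List.pyGet? koWon (-1) = some '주' then koWon
                  else koWon ++ [' ', '주']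
    String.ofList (tempAppendStr ++ PySem.List.slice koWon2 (some 1) none)

-- ===== PORT B =====
-- while n > 0: n, r = divmod(n, 10000); groups.append(r)
def pvGroupsB (n : Int) : List Int :=
  if _h : 0 < n then
    PySem.Int.mod n 10000 :: pvGroupsB (PySem.Int.floordiv n 10000)
  else []
termination_by n.toNat
decreasing_by
  have hn : n = ((n.toNat : Nat) : Int) := by omega
  rw [hn, (by norm_num : (10000 : Int) = ((10000 : Nat) : Int)), PySem.Int.floordiv_natCast]
  simp only [Int.toNat_natCast]
  exact Nat.div_lt_self (by omega) (by norm_num)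

def numberToKoreanZoo_alt (num : Int) : String :=
  let unitWord : List (List Char) := [['주'], ['만'], ['억'], ['조'], ['경'], ['해']]
  let sign : List Char := if num < 0 then ['-'] else []
  let n : Int := (num.natAbs : Int)   -- abs(num)
  if n = 0 then "0주"
  else
    let groups := pvGroupsB n
    -- [str(groups[i]) + unit_word[i] for i in reversed(range(len(groups))) if groups[i] != 0]
    let parts := ((List.range groups.length).reverse).filterMap
      (fun (i : Nat) =>
        if ¬ PySem.List.pyGetD groups (i : Int) 0 = 0 then
          some (PySem.Int.toChars (PySem.List.pyGetD groups (i : Int) 0)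
                ++ PySem.List.pyGetD unitWord (i : Int) [])
        else none)
    let body := PySem.Chars.join [' '] parts   -- ' '.join(parts)
    let body2 := if PySem.List.pyGetD groups 0 0 = 0 then body ++ [' ', '주'] else body
    String.ofList (sign ++ body2)

-- ===== PRECONDITION & SPEC =====
def Spec_numberToKoreanZoo (num : Int) (out : String) : Prop := out = numberToKoreanZoo_alt num
instance (num : Int) (out : String) : Decidable (Spec_numberToKoreanZoo num out) := by unfold Spec_numberToKoreanZoo; infer_instance

-- ===== CLAIM (what is proved, stated in full; the proofs are below) =====
def Claim_equal_numberToKoreanZoo : Prop := ∀ (num : Int), Dom_numberToKoreanZoo num → Spec_numberToKoreanZoo num (numberToKoreanZoo num)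

-- ===== LEMMAS AND PROOFS =====

-- A's grouping loop without its accumulator
def pvAG (s : List Char) : List (List Char) :=
  if 4 < s.length then s.drop (s.length - 4) :: pvAG (s.take (s.length - 4)) else [s]
termination_by s.length
decreasing_by simp only [List.length_take]; omega

-- B's group list, on naturals
def pvNG (n : Nat) : List Nat :=
  if 0 < n then n % 10000 :: pvNG (n / 10000) else []

-- ---- Nat.toDigits facts ----
theorem pv_tdc_shift (b f n : Nat) (l : List Char) :
    Nat.toDigitsCore b f n l = Nat.toDigitsCore b f n [] ++ l := by
  induction f generalizing n l with
  | zero => simp [Nat.toDigitsCore]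
  | succ f ih =>
    simp only [Nat.toDigitsCore]
    by_cases h : n / b = 0
    · simp [h]
    · simp only [h, if_false]
      rw [ih (n / b) (Nat.digitChar (n % b) :: l), ih (n / b) [Nat.digitChar (n % b)]]
      simp

theorem pv_tdc_fuel (f₁ f₂ n : Nat) (h₁ : n < f₁) (h₂ : n < f₂) :
    Nat.toDigitsCore 10 f₁ n [] = Nat.toDigitsCore 10 f₂ n [] := by
  induction n using Nat.strong_induction_on generalizing f₁ f₂ with
  | _ n ih =>
    match f₁, f₂ with
    | f₁+1, f₂+1 =>
      simp only [Nat.toDigitsCore]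
      by_cases h : n / 10 = 0
      · simp [h]
      · simp only [h, if_false]
        rw [pv_tdc_shift 10 f₁, pv_tdc_shift 10 f₂]
        rw [ih (n / 10) (by omega) f₁ f₂ (by omega) (by omega)]

theorem pv_td_small (n : Nat) (h : n < 10) : Nat.toDigits 10 n = [Nat.digitChar n] := by
  have h0 : n / 10 = 0 := by omega
  simp [Nat.toDigits, Nat.toDigitsCore, h0, Nat.mod_eq_of_lt h]

theorem pv_td_msd (n : Nat) (h : 10 ≤ n) :
    Nat.toDigits 10 n = Nat.toDigits 10 (n / 10) ++ [Nat.digitChar (n % 10)] := by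
  have h0 : n / 10 ≠ 0 := by omega
  show Nat.toDigitsCore 10 (n+1) n [] = _
  simp only [Nat.toDigitsCore, h0, if_false]
  rw [pv_tdc_shift]
  rw [pv_tdc_fuel n (n/10+1) (n/10) (by omega) (by omega)]
  rfl

theorem pv_td_ne_nil (n : Nat) : Nat.toDigits 10 n ≠ [] := by
  by_cases h : n < 10
  · simp [pv_td_small n h]
  · simp [pv_td_msd n (by omega)]

theorem pv_dc_ne_zero (d : Nat) (h0 : d ≠ 0) (h9 : d < 10) : Nat.digitChar d ≠ '0' := by
  have h1 : 1 ≤ d := by omega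
  interval_cases d <;> decide

theorem pv_dc_ne_ju (d : Nat) (h9 : d < 10) : Nat.digitChar d ≠ '주' := by
  interval_cases d <;> decide

theorem pv_td_head (n : Nat) (h : 0 < n) (c : Char) (cs : List Char)
    (he : Nat.toDigits 10 n = c :: cs) : c ≠ '0' := by
  induction n using Nat.strong_induction_on generalizing c cs with
  | _ n ih =>
    by_cases hn : n < 10
    · rw [pv_td_small n hn] at he
      cases he
      exact pv_dc_ne_zero n (by omega) hn
    · rw [pv_td_msd n (by omega)] at he
      rcases hd : Nat.toDigits 10 (n / 10) with _ | ⟨c', cs'⟩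
      · exact absurd hd (pv_td_ne_nil _)
      · rw [hd] at he
        simp only [List.cons_append, List.cons.injEq] at he
        obtain ⟨rfl, -⟩ := he
        exact ih (n / 10) (by omega) (by omega) c' cs' hd

theorem pv_td_last (n : Nat) : (Nat.toDigits 10 n).getLast? = some (Nat.digitChar (n % 10)) := by
  by_cases h : n < 10
  · rw [pv_td_small n h, Nat.mod_eq_of_lt h]; rfl
  · rw [pv_td_msd n (by omega)]
    simp

theorem pv_td_ne_zero_lit (n : Nat) (h : 0 < n) : Nat.toDigits 10 n ≠ ['0'] := by
  intro he
  exact pv_td_head n h '0' [] he rfl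

theorem pv_strip_td (n : Nat) (h : 0 < n) : pvStripA (Nat.toDigits 10 n) = Nat.toDigits 10 n := by
  rcases hd : Nat.toDigits 10 n with _ | ⟨c, cs⟩
  · rfl
  · have hc : c ≠ '0' := pv_td_head n h c cs hd
    simp [pvStripA, hc]

theorem pv_td2 (m : Nat) (h1 : 10 ≤ m) (h2 : m < 100) :
    Nat.toDigits 10 m = [Nat.digitChar (m / 10), Nat.digitChar (m % 10)] := by
  rw [pv_td_msd m h1, pv_td_small (m / 10) (by omega)]
  rfl

theorem pv_td3 (m : Nat) (h1 : 100 ≤ m) (h2 : m < 1000) :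
    Nat.toDigits 10 m = [Nat.digitChar (m / 100), Nat.digitChar (m / 10 % 10), Nat.digitChar (m % 10)] := by
  rw [pv_td_msd m (by omega), pv_td2 (m / 10) (by omega) (by omega)]
  have e1 : m / 10 / 10 = m / 100 := by omega
  rw [e1]
  rfl

theorem pv_td4 (m : Nat) (h1 : 1000 ≤ m) (h2 : m < 10000) :
    Nat.toDigits 10 m = [Nat.digitChar (m / 1000), Nat.digitChar (m / 100 % 10),
      Nat.digitChar (m / 10 % 10), Nat.digitChar (m % 10)] := by
  rw [pv_td_msd m (by omega), pv_td3 (m / 10) (by omega) (by omega)]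
  have e1 : m / 10 / 100 = m / 1000 := by omega
  have e2 : m / 10 / 10 % 10 = m / 100 % 10 := by omega
  rw [e1, e2]
  rfl

theorem pv_td_split (n : Nat) (h : 10000 ≤ n) :
    Nat.toDigits 10 n = Nat.toDigits 10 (n / 10000) ++
      [Nat.digitChar (n / 1000 % 10), Nat.digitChar (n / 100 % 10),
       Nat.digitChar (n / 10 % 10), Nat.digitChar (n % 10)] := by
  rw [pv_td_msd n (by omega), pv_td_msd (n / 10) (by omega),
      pv_td_msd (n / 10 / 10) (by omega), pv_td_msd (n / 10 / 10 / 10) (by omega)]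
  have e1 : n / 10 / 10 / 10 / 10 = n / 10000 := by omega
  have e2 : n / 10 / 10 / 10 % 10 = n / 1000 % 10 := by omega
  have e3 : n / 10 / 10 % 10 = n / 100 % 10 := by omega
  rw [e1, e2, e3]
  simp

theorem pv_strip_last4 (n : Nat) :
    pvStripA [Nat.digitChar (n / 1000 % 10), Nat.digitChar (n / 100 % 10),
      Nat.digitChar (n / 10 % 10), Nat.digitChar (n % 10)] =
    if n % 10000 = 0 then [] else Nat.toDigits 10 (n % 10000) := by
  set m := n % 10000 with hm
  have e3 : n / 1000 % 10 = m / 1000 := by omega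
  have e2 : n / 100 % 10 = m / 100 % 10 := by omega
  have e1 : n / 10 % 10 = m / 10 % 10 := by omega
  have e0 : n % 10 = m % 10 := by omega
  rw [e3, e2, e1, e0]
  by_cases hz : m = 0
  · rw [hz]
    decide
  · rw [if_neg hz]
    by_cases c4 : 1000 ≤ m
    · have hd : Nat.digitChar (m / 1000) ≠ '0' := pv_dc_ne_zero _ (by omega) (by omega)
      rw [pv_td4 m c4 (by omega)]
      simp [pvStripA, hd]
    · by_cases c3 : 100 ≤ m
      · have z3 : m / 1000 = 0 := by omega
        have hd : Nat.digitChar (m / 100 % 10) ≠ '0' := pv_dc_ne_zero _ (by omega) (by omega)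
        have e : m / 100 % 10 = m / 100 := by omega
        rw [z3, pv_td3 m c3 (by omega), ← e]
        simp [pvStripA, hd, show Nat.digitChar 0 = '0' from rfl]
      · by_cases c2 : 10 ≤ m
        · have z3 : m / 1000 = 0 := by omega
          have z2 : m / 100 % 10 = 0 := by omega
          have hd : Nat.digitChar (m / 10 % 10) ≠ '0' := pv_dc_ne_zero _ (by omega) (by omega)
          have e : m / 10 % 10 = m / 10 := by omega
          rw [z3, z2, pv_td2 m c2 (by omega), ← e]
          simp [pvStripA, hd, show Nat.digitChar 0 = '0' from rfl]
        · have z3 : m / 1000 = 0 := by omega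
          have z2 : m / 100 % 10 = 0 := by omega
          have z1 : m / 10 % 10 = 0 := by omega
          have hd : Nat.digitChar (m % 10) ≠ '0' := pv_dc_ne_zero _ (by omega) (by omega)
          have e : m % 10 = m := by omega
          rw [z3, z2, z1, pv_td_small m (by omega), ← e]
          simp [pvStripA, hd, show Nat.digitChar 0 = '0' from rfl]

-- ---- grouping equivalence ----
theorem pv_groupLoopA_eq (s : List Char) (acc : List (List Char)) :
    pvGroupLoopA s acc = acc ++ pvAG s := by
  fun_induction pvGroupLoopA s acc with
  | case1 s acc h ih =>
    rw [ih]
    conv_rhs => rw [pvAG.eq_def]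
    rw [if_pos h]
    rw [PySem.List.slice_to_neg_ofNat s 4 (by omega),
        PySem.List.slice_from_neg_ofNat s 4 (by omega)]
    simp
  | case2 s acc h =>
    conv_rhs => rw [pvAG.eq_def]
    rw [if_neg h]

theorem pv_groupsB_natCast (n : Nat) :
    pvGroupsB (n : Int) = (pvNG n).map (fun k : Nat => (k : Int)) := by
  induction n using Nat.strong_induction_on with
  | _ n ih =>
    rw [pvGroupsB.eq_def, pvNG.eq_def]
    by_cases h : 0 < n
    · rw [dif_pos (by exact_mod_cast h), if_pos h]
      rw [(by norm_num : (10000 : Int) = ((10000 : Nat) : Int)), PySem.Int.mod_natCast, PySem.Int.floordiv_natCast]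
      simp only [List.map_cons]
      rw [ih (n / 10000) (Nat.div_lt_self h (by norm_num))]
    · rw [dif_neg (by exact_mod_cast h), if_neg h]
      rfl

theorem pv_AG_strip (n : Nat) (h : 0 < n) :
    (pvAG (Nat.toDigits 10 n)).map pvStripA =
      (pvNG n).map (fun g => if g = 0 then [] else Nat.toDigits 10 g) := by
  induction n using Nat.strong_induction_on with
  | _ n ih =>
    by_cases hb : n < 10000
    · have hlen : (Nat.toDigits 10 n).length ≤ 4 :=
        Nat.toDigits_length 10 n 4 (by norm_num) (by norm_num; omega)
      rw [pvAG.eq_def, if_neg (by omega)]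
      rw [pvNG.eq_def, if_pos h, pvNG.eq_def, if_neg (by omega)]
      simp only [List.map_cons, List.map_nil]
      rw [pv_strip_td n h]
      rw [if_neg (by omega), Nat.mod_eq_of_lt hb]
    · have hq : 0 < n / 10000 := by omega
      have hsplit := pv_td_split n (by omega)
      have hlq : 0 < (Nat.toDigits 10 (n / 10000)).length :=
        List.length_pos_of_ne_nil (pv_td_ne_nil _)
      have hlen : (Nat.toDigits 10 n).length = (Nat.toDigits 10 (n / 10000)).length + 4 := by
        rw [hsplit]; simp
      rw [pvAG.eq_def, if_pos (by omega)]
      rw [pvNG.eq_def, if_pos h]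
      simp only [List.map_cons]
      have hdrop : (Nat.toDigits 10 n).drop ((Nat.toDigits 10 n).length - 4) =
          [Nat.digitChar (n / 1000 % 10), Nat.digitChar (n / 100 % 10),
           Nat.digitChar (n / 10 % 10), Nat.digitChar (n % 10)] := by
        rw [hlen, hsplit, Nat.add_sub_cancel, List.drop_left]
      have htake : (Nat.toDigits 10 n).take ((Nat.toDigits 10 n).length - 4) =
          Nat.toDigits 10 (n / 10000) := by
        rw [hlen, hsplit, Nat.add_sub_cancel, List.take_left]
      rw [hdrop, htake, pv_strip_last4 n, ih (n / 10000) (by omega) hq]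

theorem pv_NG_ne_nil (n : Nat) (h : 0 < n) : pvNG n ≠ [] := by
  rw [pvNG.eq_def, if_pos h]; simp

theorem pv_NG_last (n : Nat) (h : 0 < n) :
    (pvNG n).getD ((pvNG n).length - 1) 0 ≠ 0 := by
  induction n using Nat.strong_induction_on with
  | _ n ih =>
    by_cases hb : n < 10000
    · rw [pvNG.eq_def, if_pos h, pvNG.eq_def, if_neg (by omega)]
      simpa [Nat.mod_eq_of_lt hb] using (by omega : n ≠ 0)
    · have hq : 0 < n / 10000 := by omega
      rw [pvNG.eq_def, if_pos h]
      have ht := pv_NG_ne_nil (n / 10000) hq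
      have hl : 0 < (pvNG (n / 10000)).length := List.length_pos_of_ne_nil ht
      have : (n % 10000 :: pvNG (n / 10000)).getD ((n % 10000 :: pvNG (n / 10000)).length - 1) 0
          = (pvNG (n / 10000)).getD ((pvNG (n / 10000)).length - 1) 0 := by
        simp only [List.length_cons]
        rw [Nat.add_sub_cancel]
        rcases Nat.exists_eq_add_of_lt hl with ⟨j, hj⟩
        rw [show (pvNG (n / 10000)).length = j + 1 by omega]
        simp
      rw [this]
      exact ih (n / 10000) (by omega) hq

-- ---- loop shapes ----
theorem pv_koLoopA_flat (numList unitWord : List (List Char)) :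
    pvKoLoopA numList unitWord =
      ((List.range numList.length).reverse.filter
          (fun i : Nat => decide (¬ (pvStripA (PySem.List.pyGetD numList (i : Int) [])).length = 0))).flatMap
        (fun i : Nat => [' '] ++ pvStripA (PySem.List.pyGetD numList (i : Int) [])
            ++ PySem.List.pyGetD unitWord (i : Int) []) := by
  unfold pvKoLoopA
  generalize (List.range numList.length).reverse = l
  suffices h : ∀ (acc : List Char),
      l.foldl (fun (koWon : List Char) (i : Nat) =>
        let tempStr := pvStripA (PySem.List.pyGetD numList (i : Int) [])
        if ¬ tempStr.length = 0 then
          koWon ++ [' '] ++ tempStr ++ PySem.List.pyGetD unitWord (i : Int) []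
        else koWon) acc
      = acc ++ (l.filter
          (fun i : Nat => decide (¬ (pvStripA (PySem.List.pyGetD numList (i : Int) [])).length = 0))).flatMap
        (fun i : Nat => [' '] ++ pvStripA (PySem.List.pyGetD numList (i : Int) [])
            ++ PySem.List.pyGetD unitWord (i : Int) []) by
    exact h []
  induction l with
  | nil => intro acc; simp
  | cons x xs ih =>
    intro acc
    by_cases h : (pvStripA (PySem.List.pyGetD numList (x : Int) [])).length = 0
    · simp only [List.foldl_cons, List.filter_cons]
      rw [ih]
      have h' : pvStripA (numList[x]?.getD []) = [] := by simpa using h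
      simp [h']
    · simp only [List.foldl_cons, List.filter_cons]
      rw [ih]
      have h' : ¬ pvStripA (numList[x]?.getD []) = [] := by simpa using h
      simp [h']

theorem pv_filterMap_if {α β : Type} (p : α → Prop) [DecidablePred p]
    (f : α → β) (l : List α) :
    l.filterMap (fun i => if p i then some (f i) else none) =
      (l.filter (fun i => decide (p i))).map f := by
  induction l with
  | nil => rfl
  | cons x xs ih =>
    by_cases h : p x
    · simp [h, ih]
    · simp [h, ih]

theorem pv_flat_sp (P : List (List Char)) (h : P ≠ []) :
    P.flatMap (fun pt => ' ' :: pt) = ' ' :: List.intercalate [' '] P := by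
  induction P with
  | nil => simp at h
  | cons q qs ih =>
    cases qs with
    | nil => simp [List.intercalate]
    | cons r rs =>
      rw [List.flatMap_cons, ih (by simp)]
      have : List.intercalate [' '] (q :: r :: rs) = q ++ [' '] ++ List.intercalate [' '] (r :: rs) := by
        simp [List.intercalate, List.intersperse]
      rw [this]
      simp

theorem pv_toChars_natCast (g : Nat) : PySem.Int.toChars (g : Int) = Nat.toDigits 10 g := by
  simp [PySem.Int.toChars]

theorem pv_last_ne_ju (j g : Nat) (hj : j ≠ 0) :
    (' ' :: (Nat.toDigits 10 g ++
      ([['주'], ['만'], ['억'], ['조'], ['경'], ['해']] : List (List Char)).getD j [])).getLast?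
    ≠ some '주' := by
  by_cases h6 : j ≤ 5
  · have h1 : 1 ≤ j := by omega
    interval_cases j <;> simp [List.getLast?_cons]
  · rw [List.getD_eq_default _ _ (by simp; omega)]
    rw [List.append_nil]
    have hne := pv_td_ne_nil g
    rcases hd : Nat.toDigits 10 g with _ | ⟨c, cs⟩
    · exact absurd hd hne
    · rw [List.getLast?_cons]
      rw [← hd, pv_td_last g]
      simp only [Option.getD_some]
      intro hcon
      exact pv_dc_ne_ju (g % 10) (by omega) (by injection hcon)

-- the indices (most significant group first) of the nonzero groups of N
def pvSel (N : Nat) : List Nat :=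
  ((List.range (pvNG N).length).reverse).filter (fun i => decide (¬ (pvNG N).getD i 0 = 0))

-- the printed piece for group index i: digits of the group followed by its unit word
def pvF (N : Nat) (i : Nat) : List Char :=
  Nat.toDigits 10 ((pvNG N).getD i 0) ++
    ([['주'], ['만'], ['억'], ['조'], ['경'], ['해']] : List (List Char)).getD i []

theorem pv_AG_len (N : Nat) (h : 0 < N) :
    (pvAG (Nat.toDigits 10 N)).length = (pvNG N).length := by
  have := congrArg List.length (pv_AG_strip N h)
  simpa using this

theorem pv_pointwise (N : Nat) (h : 0 < N) (i : Nat) (hi : i < (pvNG N).length) :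
    pvStripA ((pvAG (Nat.toDigits 10 N)).getD i []) =
      (if (pvNG N).getD i 0 = 0 then [] else Nat.toDigits 10 ((pvNG N).getD i 0)) := by
  have hk := pv_AG_len N h
  have h4 := congrArg (fun l => l[i]?) (pv_AG_strip N h)
  simp only [List.getElem?_map] at h4
  rw [List.getElem?_eq_getElem (l := pvAG (Nat.toDigits 10 N)) (by omega),
      List.getElem?_eq_getElem (l := pvNG N) hi] at h4
  simp only [Option.map_some, Option.some.injEq] at h4
  rw [List.getD_eq_getElem _ _ (by omega : i < (pvAG (Nat.toDigits 10 N)).length),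
      List.getD_eq_getElem _ _ hi]
  exact h4

theorem pv_A_norm (num : Int) (h : 0 < num.natAbs) :
    numberToKoreanZoo num =
      String.ofList ((if num < 0 then ['-'] else []) ++
        (if ((pvSel num.natAbs).flatMap (fun i => ' ' :: pvF num.natAbs i)).getLast? = some '주'
         then ((pvSel num.natAbs).flatMap (fun i => ' ' :: pvF num.natAbs i)).tail
         else (((pvSel num.natAbs).flatMap (fun i => ' ' :: pvF num.natAbs i)) ++ [' ', '주']).tail)) := by
  set N := num.natAbs with hN
  simp only [numberToKoreanZoo]
  rw [pv_toChars_natCast, if_neg (pv_td_ne_zero_lit N h)]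
  rw [pv_groupLoopA_eq, List.nil_append, pv_koLoopA_flat, pv_AG_len N h]
  have hconv :
      (((List.range (pvNG N).length).reverse).filter
          (fun i : Nat => decide (¬ (pvStripA (PySem.List.pyGetD (pvAG (Nat.toDigits 10 N)) (i : Int) [])).length = 0))).flatMap
        (fun i : Nat => [' '] ++ pvStripA (PySem.List.pyGetD (pvAG (Nat.toDigits 10 N)) (i : Int) [])
            ++ PySem.List.pyGetD ([['주'], ['만'], ['억'], ['조'], ['경'], ['해']] : List (List Char)) (i : Int) []) =
      (pvSel N).flatMap (fun i => ' ' :: pvF N i) := by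
    have hfil :
        ((List.range (pvNG N).length).reverse).filter
            (fun i : Nat => decide (¬ (pvStripA (PySem.List.pyGetD (pvAG (Nat.toDigits 10 N)) (i : Int) [])).length = 0))
          = pvSel N := by
      unfold pvSel
      apply List.filter_congr
      intro i hi
      have hi' : i < (pvNG N).length := by
        simp only [List.mem_reverse, List.mem_range] at hi
        exact hi
      simp only [PySem.List.pyGetD_natCast, decide_eq_decide]
      by_cases hz : (pvNG N).getD i 0 = 0
      · rw [pv_pointwise N h i hi', if_pos hz]
        simp only [List.getD] at hz
        simp only [List.length_nil]
        simp [hz]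
      · rw [pv_pointwise N h i hi', if_neg hz]
        have hne := pv_td_ne_nil ((pvNG N).getD i 0)
        simp only [List.getD] at hz hne
        simp [List.length_eq_zero_iff, hne, hz]
    rw [hfil]
    rw [List.flatMap_def, List.flatMap_def]
    congr 1
    apply List.map_congr_left
    intro i hi
    have hi2 := hi
    unfold pvSel at hi2
    rw [List.mem_filter] at hi2
    have hi' : i < (pvNG N).length := by
      have := hi2.1
      simp only [List.mem_reverse, List.mem_range] at this
      exact this
    have hz : ¬ (pvNG N).getD i 0 = 0 := by simpa using hi2.2
    simp only [PySem.List.pyGetD_natCast]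
    rw [pv_pointwise N h i hi', if_neg hz]
    unfold pvF
    rfl
  rw [hconv]
  rw [PySem.List.pyGet?_neg_one]
  by_cases hju :
      ((pvSel N).flatMap (fun i => ' ' :: pvF N i)).getLast? = some '주'
  · rw [if_pos hju, if_pos hju, PySem.List.slice_from_one]
  · rw [if_neg hju, if_neg hju, PySem.List.slice_from_one]

theorem pv_B_norm (num : Int) (h : 0 < num.natAbs) :
    numberToKoreanZoo_alt num =
      String.ofList ((if num < 0 then ['-'] else []) ++
        (if (pvNG num.natAbs).getD 0 0 = 0
         then List.intercalate [' '] ((pvSel num.natAbs).map (pvF num.natAbs)) ++ [' ', '주']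
         else List.intercalate [' '] ((pvSel num.natAbs).map (pvF num.natAbs)))) := by
  set N := num.natAbs with hN
  have hLne : pvNG N ≠ [] := pv_NG_ne_nil N h
  have hLpos : 0 < (pvNG N).length := List.length_pos_of_ne_nil hLne
  simp only [numberToKoreanZoo_alt]
  rw [if_neg (show ¬ ((N : Int) = 0) by omega)]
  rw [pv_groupsB_natCast]
  have hglen : ((pvNG N).map (fun k : Nat => (k : Int))).length = (pvNG N).length := by simp
  rw [hglen]
  have hget : ∀ i : Nat, i < (pvNG N).length →
      PySem.List.pyGetD ((pvNG N).map (fun k : Nat => (k : Int))) (i : Int) 0 = ((pvNG N).getD i 0 : Int) := by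
    intro i hi
    rw [PySem.List.pyGetD_natCast]
    rw [List.getD_eq_getElem _ _ (by simpa using hi), List.getD_eq_getElem _ _ hi]
    simp
  rw [pv_filterMap_if (fun i : Nat => ¬ PySem.List.pyGetD ((pvNG N).map (fun k : Nat => (k : Int))) (i : Int) 0 = 0)]
  have hfil :
      ((List.range (pvNG N).length).reverse).filter
          (fun i : Nat => decide (¬ PySem.List.pyGetD ((pvNG N).map (fun k : Nat => (k : Int))) (i : Int) 0 = 0))
        = pvSel N := by
    unfold pvSel
    apply List.filter_congr
    intro i hi
    have hi' : i < (pvNG N).length := by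
      simp only [List.mem_reverse, List.mem_range] at hi
      exact hi
    rw [hget i hi']
    simp
  rw [hfil]
  have hmap :
      (pvSel N).map (fun i : Nat =>
        PySem.Int.toChars (PySem.List.pyGetD ((pvNG N).map (fun k : Nat => (k : Int))) (i : Int) 0)
          ++ PySem.List.pyGetD ([['주'], ['만'], ['억'], ['조'], ['경'], ['해']] : List (List Char)) (i : Int) [])
        = (pvSel N).map (pvF N) := by
    apply List.map_congr_left
    intro i hi
    have hi' : i < (pvNG N).length := by
      unfold pvSel at hi
      rw [List.mem_filter] at hi
      have := hi.1
      simp only [List.mem_reverse, List.mem_range] at this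
      exact this
    rw [hget i hi', pv_toChars_natCast, PySem.List.pyGetD_natCast]
    unfold pvF
    rfl
  rw [hmap]
  have hjoin : PySem.Chars.join [' '] ((pvSel N).map (pvF N))
      = List.intercalate [' '] ((pvSel N).map (pvF N)) := rfl
  rw [hjoin]
  have hzero : PySem.List.pyGetD ((pvNG N).map (fun k : Nat => (k : Int))) 0 0
      = ((pvNG N).getD 0 0 : Int) := by
    have := hget 0 hLpos
    simpa using this
  rw [PySem.List.pyGetD_zero] at hzero ⊢
  rw [hzero]
  by_cases hz : (pvNG N).getD 0 0 = 0
  · have hzc : ((pvNG N).getD 0 0 : Int) = 0 := by exact_mod_cast hz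
    rw [if_pos hzc, if_pos hz]
  · have hzc : ¬ ((pvNG N).getD 0 0 : Int) = 0 := by exact_mod_cast hz
    rw [if_neg hzc, if_neg hz]

-- ===== VERDICT (by name: the statement is the Claim_ definition above) =====
theorem numberToKoreanZoo_spec : Claim_equal_numberToKoreanZoo := by
  intro num _
  show numberToKoreanZoo num = numberToKoreanZoo_alt num
  by_cases h0 : num.natAbs = 0
  · have : num = 0 := by omega
    subst this
    decide
  · have h : 0 < num.natAbs := Nat.pos_of_ne_zero h0
    rw [pv_A_norm num h, pv_B_norm num h]
    set N := num.natAbs with hNd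
    have hLpos : 0 < (pvNG N).length := List.length_pos_of_ne_nil (pv_NG_ne_nil N h)
    have hse : pvSel N ≠ [] := by
      apply List.ne_nil_of_mem (a := (pvNG N).length - 1)
      unfold pvSel
      rw [List.mem_filter]
      constructor
      · rw [List.mem_reverse, List.mem_range]
        omega
      · simpa using pv_NG_last N h
    have hmem : ∀ i ∈ pvSel N, ¬ (pvNG N).getD i 0 = 0 := by
      intro i hi
      unfold pvSel at hi
      rw [List.mem_filter] at hi
      simpa using hi.2
    have hko : (pvSel N).flatMap (fun i => ' ' :: pvF N i)
        = ' ' :: List.intercalate [' '] ((pvSel N).map (pvF N)) := by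
      rw [← List.flatMap_map (pvF N) (fun pt => ' ' :: pt) (pvSel N)]
      exact pv_flat_sp _ (by simpa using hse)
    congr 2
    by_cases hz : (pvNG N).getD 0 0 = 0
    · -- units group zero: A's last char is not '주', both append " 주"
      have hju : ((pvSel N).flatMap (fun i => ' ' :: pvF N i)).getLast? ≠ some '주' := by
        rw [← List.dropLast_append_getLast hse, List.flatMap_append]
        have hj : (pvSel N).getLast hse ∈ pvSel N := List.getLast_mem hse
        have hjz : ¬ (pvNG N).getD ((pvSel N).getLast hse) 0 = 0 := hmem _ hj
        have hjne : (pvSel N).getLast hse ≠ 0 := by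
          intro hcon
          rw [hcon] at hjz
          exact hjz hz
        rw [List.getLast?_append]
        have hflat : List.flatMap (fun i => ' ' :: pvF N i) [(pvSel N).getLast hse]
            = ' ' :: pvF N ((pvSel N).getLast hse) := by simp
        rw [hflat]
        have := pv_last_ne_ju ((pvSel N).getLast hse) ((pvNG N).getD ((pvSel N).getLast hse) 0) hjne
        unfold pvF
        simpa using this
      rw [if_neg hju, if_pos hz, hko]
      rfl
    · -- units group nonzero: A's string ends in '주'
      have hrne : (List.range (pvNG N).length).reverse ≠ [] := by
        simp only [ne_eq, List.reverse_eq_nil_iff, List.range_eq_nil]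
        omega
      have hgl0 : (List.range (pvNG N).length).reverse.getLast hrne = 0 := by
        obtain ⟨j, hj⟩ : ∃ j, (pvNG N).length = j + 1 := ⟨(pvNG N).length - 1, by omega⟩
        have h1 : (List.range (pvNG N).length).reverse.getLast? = some 0 := by
          rw [List.getLast?_reverse, hj, List.range_succ_eq_map]
          rfl
        have h2 := List.getLast?_eq_some_getLast (l := (List.range (pvNG N).length).reverse) hrne
        exact Option.some_injective _ (h2.symm.trans h1)
      have hsel : pvSel N = ((List.range (pvNG N).length).reverse.dropLast).filter
            (fun i => decide (¬ (pvNG N).getD i 0 = 0)) ++ [0] := by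
        unfold pvSel
        conv_lhs => rw [← List.dropLast_append_getLast hrne, hgl0]
        rw [List.filter_append]
        congr 1
        have hz' : ¬ (pvNG N)[0]?.getD 0 = 0 := by simpa [List.getD] using hz
        simp [hz']
      have hju : ((pvSel N).flatMap (fun i => ' ' :: pvF N i)).getLast? = some '주' := by
        rw [hsel, List.flatMap_append]
        rw [List.getLast?_append]
        have hflat : List.flatMap (fun i => ' ' :: pvF N i) [0] = ' ' :: pvF N 0 := by simp
        rw [hflat]
        unfold pvF
        simp [List.getLast?_cons]
      rw [if_pos hju, if_neg hz, hko]
      rfl
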